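-- pv_equiv track=rewrite | github.com/dangpandora/BLOCKQ2 | BlockQ.py | GC_cal
-- ===== SOURCE A (Python) =====
-- def GC_cal(p_str):
--     gc=0
--     for i in range(len(p_str)):
--         if p_str[i] == 'G' or p_str[i] == 'C':
--             gc += 1
--         else:
--             continue
--     return gc
-- ===== SOURCE B (Python) =====
-- def GC_cal(p_str):
--     freq = {}
--     for ch in p_str:
--         freq[ch] = freq.get(ch, 0) + 1
--     return freq.get('G', 0) + freq.get('C', 0)
-- ===== Notes on version B (the rewrite author's own statement) =====
-- stated objective: alternative
-- what changed: B builds a full character-frequency dictionary in one pass (the Counter pattern) and then reads off the 'G' and 'C' entries, instead of A's index loop that branches per character on G/C.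
import Mathlib
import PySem

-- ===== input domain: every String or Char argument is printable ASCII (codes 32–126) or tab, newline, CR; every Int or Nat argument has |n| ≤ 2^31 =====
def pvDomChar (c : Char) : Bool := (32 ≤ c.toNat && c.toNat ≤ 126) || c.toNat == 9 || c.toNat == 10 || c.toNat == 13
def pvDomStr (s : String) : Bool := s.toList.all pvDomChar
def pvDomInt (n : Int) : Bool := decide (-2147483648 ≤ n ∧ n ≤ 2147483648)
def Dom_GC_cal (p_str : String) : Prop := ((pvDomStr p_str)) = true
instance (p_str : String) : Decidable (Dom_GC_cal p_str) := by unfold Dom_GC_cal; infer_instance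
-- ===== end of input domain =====

-- B builds a character-frequency dictionary first, then sums the 'G' and 'C' entries (alternative decomposition; same cost).
-- ===== PORT A =====
def GC_cal (p_str : String) : Int :=
  (PySem.List.pyRange 0 (PySem.Str.len p_str) 1).foldl
    (fun gc i =>
      if PySem.List.pyGetD p_str.toList i ' ' = 'G' ∨ PySem.List.pyGetD p_str.toList i ' ' = 'C'
      then gc + 1 else gc) 0

-- ===== PORT B =====
def GC_cal_alt (p_str : String) : Int :=
  let freq : PySem.Dict Char Int :=
    p_str.toList.foldl (fun d ch => d.modify ch 0 (· + 1)) PySem.Dict.empty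
  freq.getD 'G' 0 + freq.getD 'C' 0

-- ===== PRECONDITION & SPEC =====
def Spec_GC_cal (p_str : String) (out : Int) : Prop := out = GC_cal_alt p_str
instance (p_str : String) (out : Int) : Decidable (Spec_GC_cal p_str out) := by unfold Spec_GC_cal; infer_instance

-- ===== CLAIM (what is proved, stated in full; the proofs are below) =====
def Claim_equal_GC_cal : Prop := ∀ (p_str : String), Dom_GC_cal p_str → Spec_GC_cal p_str (GC_cal p_str)

-- ===== LEMMAS AND PROOFS =====

lemma gc_foldl_count (l : List Char) (init : Int) :
    l.foldl (fun gc c => if c = 'G' ∨ c = 'C' then gc + 1 else gc) init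
      = init + l.count 'G' + l.count 'C' := by
  induction l generalizing init with
  | nil => simp
  | cons c t ih =>
    simp only [List.foldl_cons, List.count_cons, ih]
    by_cases hG : c = 'G' <;> by_cases hC : c = 'C' <;>
      simp [hG, hC] <;> omega

-- ===== VERDICT (by name: the statement is the Claim_ definition above) =====
theorem GC_cal_spec : Claim_equal_GC_cal := by
  intro s _
  unfold Spec_GC_cal GC_cal GC_cal_alt
  rw [show PySem.Str.len s = PySem.List.len s.toList from rfl,
      PySem.List.foldl_pyRange_zero_pyGetD s.toList ' '
        (fun gc c => if c = 'G' ∨ c = 'C' then gc + 1 else gc) 0,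
      ← PySem.Dict.counter_eq_foldl]
  simp [gc_foldl_count, PySem.Dict.getD_counter]
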